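-- pv_equiv track=rewrite | github.com/kashima1234/labs_py | aaaall labs/Python/semestar 1/ЛБ10.py | centerAlign
-- ===== SOURCE A (Python) =====
-- def centerAlign(listed, scrWidth):  #Выравниваем текст по ширине
--     breakedLines = []
--     i = -1
--     for line in listed:         # срезаем строку
--         breakedLines.append([''])
--         i += 1
--         j = 0
--         for char in line:
--             if char == ' ':     #split
--                 breakedLines[i].append(char)
--                 breakedLines[i].append('')
--                 j += 2
--             else:
--                 breakedLines[i][j] += char
--         if '' in breakedLines[i]:
--             breakedLines[i].remove('')  #если существует пустая строка,тогда удаляем ее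
--
--     for i in range(len(breakedLines)):  # выравниваем строку
--         spaces = breakedLines[i].count(' ')
--         if spaces != 0:
--             lenLn = 0
--             for j in range(len(breakedLines[i])):
--                 lenLn += len(breakedLines[i][j])
--
--             differ = scrWidth - lenLn
--             toAdd = differ % spaces
--             for j in range(len(breakedLines[i])):
--                 if breakedLines[i][j] == ' ':
--                     breakedLines[i][j] += ' ' * (differ//spaces + (1 if toAdd > 0 else 0))
--                     toAdd -= 1
--         breakedLines[i] = ''.join(breakedLines[i])
--
--     return breakedLines
-- ===== SOURCE B (Python) =====
-- def centerAlign(listed, scrWidth):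
--     result = []
--     for line in listed:
--         spaces = line.count(' ')
--         if spaces == 0:
--             result.append(line)
--             continue
--         differ = scrWidth - len(line)
--         base = differ // spaces
--         extra = differ % spaces
--         out = []
--         k = 0
--         for ch in line:
--             if ch == ' ':
--                 out.append(' ' * (1 + max(0, base + (1 if k < extra else 0))))
--                 k += 1
--             else:
--                 out.append(ch)
--         result.append(''.join(out))
--     return result
-- ===== Notes on version B (the rewrite author's own statement) =====
-- stated objective: simpler
-- what changed: B drops A's intermediate word/space token list, the index-mutating alignment pass and the remove('') fix-up: per line it computes spaces/base/extra directly from the string and emits the justified line in one direct pass over the characters with a space counter.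
import Mathlib
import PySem

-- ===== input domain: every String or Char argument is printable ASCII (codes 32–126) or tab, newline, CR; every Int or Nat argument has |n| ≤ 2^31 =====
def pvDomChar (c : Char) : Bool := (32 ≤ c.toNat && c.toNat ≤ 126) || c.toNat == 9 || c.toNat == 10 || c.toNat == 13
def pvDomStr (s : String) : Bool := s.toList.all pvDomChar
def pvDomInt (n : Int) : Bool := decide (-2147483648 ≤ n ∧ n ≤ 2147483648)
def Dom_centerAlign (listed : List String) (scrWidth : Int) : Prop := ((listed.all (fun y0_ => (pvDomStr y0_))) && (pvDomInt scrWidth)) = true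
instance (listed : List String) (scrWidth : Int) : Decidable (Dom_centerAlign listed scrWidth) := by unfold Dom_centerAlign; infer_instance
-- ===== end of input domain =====

-- B justifies each line in ONE pass over its characters (spaces/base/extra computed from the
-- string itself), instead of A's token list + index-mutating alignment pass + remove('') fix-up.

-- ===== PORT A =====
-- ' ' * n for n : Int — Python yields '' when n ≤ 0, which Int.toNat's clamping reproduces exactly
def caRep (n : Int) : List Char := List.replicate n.toNat ' '

-- inner split loop of A, state = (breakedLines[i], j); `breakedLines[i][j] += char` via getD/set
-- (j : Nat — Python's j is a nonnegative int and is always in range here)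
def caSplitStep (st : List (List Char) × Nat) (c : Char) : List (List Char) × Nat :=
  if c = ' ' then (st.1 ++ [[' ']] ++ [[]], st.2 + 2)
  else (st.1.set st.2 (st.1.getD st.2 [] ++ [c]), st.2)

-- one line of A's first loop: build the token list, then `if '' in …: ….remove('')`
def caSplit (line : List Char) : List (List Char) :=
  let st := line.foldl caSplitStep ([[]], 0)
  if [] ∈ st.1 then (PySem.List.remove? st.1 []).getD st.1 else st.1

-- body of `for j in range(len(breakedLines[i]))`: mutate slot j, decrement toAdd
def caAlignStep (differ spaces : Int) (st : List (List Char) × Int) (j : Int) :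
    List (List Char) × Int :=
  if PySem.List.pyGetD st.1 j [] = [' '] then
    (PySem.List.pySetD st.1 j (PySem.List.pyGetD st.1 j [] ++
        caRep (PySem.Int.floordiv differ spaces + (if st.2 > 0 then 1 else 0))), st.2 - 1)
  else st

-- one line of A's second loop
def caAlign (scrWidth : Int) (toks : List (List Char)) : List Char :=
  let spaces : Int := (PySem.List.count toks [' '] : Int)
  if spaces ≠ 0 then
    let lenLn : Int := (PySem.List.pyRange 0 (PySem.List.len toks)).foldl
      (fun acc j => acc + PySem.List.len (PySem.List.pyGetD toks j [])) 0
    let differ := scrWidth - lenLn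
    let st := (PySem.List.pyRange 0 (PySem.List.len toks)).foldl
      (caAlignStep differ spaces) (toks, PySem.Int.mod differ spaces)
    PySem.Chars.join [] st.1
  else PySem.Chars.join [] toks

def centerAlign (listed : List String) (scrWidth : Int) : List String :=
  let breakedLines := listed.map (fun line => caSplit line.toList)
  breakedLines.map (fun toks => String.ofList (caAlign scrWidth toks))

-- ===== PORT B =====
-- B's single pass, state = (out, k)
def cbStep (base extra : Int) (st : List (List Char) × Int) (c : Char) :
    List (List Char) × Int :=
  if c = ' ' then
    (st.1 ++ [List.replicate (1 + max 0 (base + (if st.2 < extra then 1 else 0))).toNat ' '],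
     st.2 + 1)
  else (st.1 ++ [[c]], st.2)

def cbLine (scrWidth : Int) (cs : List Char) : List Char :=
  let spaces : Int := (cs.count ' ' : Int)   -- line.count(' '): single-character needle, exact
  if spaces = 0 then cs
  else
    let differ := scrWidth - (cs.length : Int)
    let base := PySem.Int.floordiv differ spaces
    let extra := PySem.Int.mod differ spaces
    ((cs.foldl (cbStep base extra) ([], 0)).1).flatten   -- ''.join(out)

def centerAlign_alt (listed : List String) (scrWidth : Int) : List String :=
  listed.map (fun line => String.ofList (cbLine scrWidth line.toList))

-- ===== PRECONDITION & SPEC =====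
def Spec_centerAlign (listed : List String) (scrWidth : Int) (out : List String) : Prop := out = centerAlign_alt listed scrWidth
instance (listed : List String) (scrWidth : Int) (out : List String) : Decidable (Spec_centerAlign listed scrWidth out) := by unfold Spec_centerAlign; infer_instance

-- ===== CLAIM (what is proved, stated in full; the proofs are below) =====
def Claim_equal_centerAlign : Prop := ∀ (listed : List String) (scrWidth : Int), Dom_centerAlign listed scrWidth → Spec_centerAlign listed scrWidth (centerAlign listed scrWidth)

-- ===== LEMMAS AND PROOFS =====

-- the token list A's first loop produces for one line, as (head, tail) of a nonempty list
def pvTok (cs : List Char) : List Char × List (List Char) :=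
  match cs with
  | [] => ([], [])
  | c :: cs' =>
    let r := pvTok cs'
    if c = ' ' then ([], [' '] :: r.1 :: r.2) else (c :: r.1, r.2)

def pvTokL (cs : List Char) : List (List Char) := (pvTok cs).1 :: (pvTok cs).2

-- what A's alignment pass does to a token list, as a structural recursion
def pvExpand (b : Int) : List (List Char) → Int → List (List Char)
  | [], _ => []
  | t :: ts, a =>
    if t = [' '] then (t ++ caRep (b + (if a > 0 then 1 else 0))) :: pvExpand b ts (a - 1)
    else t :: pvExpand b ts a

-- the pieces B's single pass appends, as a structural recursion
def pvPieces (b e : Int) : List Char → Int → List (List Char)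
  | [], _ => []
  | c :: cs, k =>
    (if c = ' ' then List.replicate (1 + max 0 (b + (if k < e then 1 else 0))).toNat ' '
     else [c]) :: pvPieces b e cs (k + (if c = ' ' then 1 else 0))

lemma pvJoin_nil_flatten (l : List (List Char)) : PySem.Chars.join [] l = l.flatten := by
  induction l with
  | nil => simp [PySem.Chars.join, List.intercalate]
  | cons p rest ih =>
    cases rest with
    | nil => simp [PySem.Chars.join, List.intercalate]
    | cons q r => rw [PySem.Chars.join_cons_cons]; simp [ih]

lemma pvSplit_fold (cs : List Char) : ∀ (pre : List (List Char)) (cur : List Char),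
    cs.foldl caSplitStep (pre ++ [cur], pre.length)
      = (pre ++ (cur ++ (pvTok cs).1) :: (pvTok cs).2, pre.length + (pvTok cs).2.length) := by
  induction cs with
  | nil => intro pre cur; simp [pvTok]
  | cons c cs ih =>
    intro pre cur
    by_cases hc : c = ' '
    · have hstep : caSplitStep (pre ++ [cur], pre.length) c
          = ((pre ++ [cur, [' ']]) ++ [[]], (pre ++ [cur, [' ']]).length) := by
        simp [caSplitStep, hc]
      rw [List.foldl_cons, hstep, ih (pre ++ [cur, [' ']]) []]
      simp [pvTok, hc]
      omega
    · have hget : List.getD (pre ++ [cur]) pre.length [] = cur := by simp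
      have hset : (pre ++ [cur]).set pre.length (cur ++ [c]) = pre ++ [cur ++ [c]] := by
        simp
      have hstep : caSplitStep (pre ++ [cur], pre.length) c
          = (pre ++ [cur ++ [c]], pre.length) := by
        simp [caSplitStep, hc, hset]
      rw [List.foldl_cons, hstep, ih pre (cur ++ [c])]
      simp [pvTok, hc]

lemma pvSplit_eq (cs : List Char) :
    caSplit cs = if [] ∈ pvTokL cs then (pvTokL cs).erase [] else pvTokL cs := by
  have h := pvSplit_fold cs [] []
  simp only [List.nil_append, List.length_nil, Nat.zero_add] at h
  unfold caSplit
  rw [h]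
  by_cases hmem : ([] : List Char) ∈ pvTokL cs
  · have hmem' : ([] : List Char) ∈ (pvTok cs).1 :: (pvTok cs).2 := hmem
    rw [if_pos hmem', if_pos hmem, PySem.List.remove?_eq_some_erase _ _ hmem']
    rfl
  · have hmem' : ¬ ([] : List Char) ∈ (pvTok cs).1 :: (pvTok cs).2 := hmem
    rw [if_neg hmem', if_neg hmem]
    rfl

lemma pvTok_fst_ne (cs : List Char) : (pvTok cs).1 ≠ [' '] := by
  induction cs with
  | nil => simp [pvTok]
  | cons c cs ih =>
    by_cases hc : c = ' ' <;> simp [pvTok, hc]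

lemma pvTok_count (cs : List Char) : (pvTokL cs).count [' '] = cs.count ' ' := by
  unfold pvTokL
  induction cs with
  | nil => simp [pvTok]
  | cons c cs ih =>
    by_cases hc : c = ' '
    · simp [pvTok, hc, List.count_cons] at ih ⊢
      omega
    · have hne : (pvTok cs).1 ≠ [' '] := pvTok_fst_ne cs
      simp [pvTok, hc, hne] at ih ⊢
      simpa [hne] using ih

lemma pvTok_sumlen (cs : List Char) :
    ((pvTokL cs).map PySem.List.len).sum = (cs.length : Int) := by
  unfold pvTokL
  induction cs with
  | nil => simp [pvTok, PySem.List.len]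
  | cons c cs ih =>
    by_cases hc : c = ' ' <;>
      simp [pvTok, hc, PySem.List.len_eq] at ih ⊢ <;> omega

lemma pvTok_flatten (cs : List Char) : (pvTokL cs).flatten = cs := by
  unfold pvTokL
  induction cs with
  | nil => simp [pvTok]
  | cons c cs ih =>
    by_cases hc : c = ' ' <;> simp [pvTok, hc] at ih ⊢ <;> simp [ih]

lemma pvExpand_append (b : Int) (xs ys : List (List Char)) (a : Int) :
    pvExpand b (xs ++ ys) a = pvExpand b xs a ++ pvExpand b ys (a - (xs.count [' '] : Int)) := by

  induction xs generalizing a with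
  | nil => simp [pvExpand]
  | cons t ts ih =>
    by_cases ht : t = [' ']
    · rw [List.cons_append,
        show pvExpand b (t :: (ts ++ ys)) a
            = (t ++ caRep (b + if a > 0 then 1 else 0)) :: pvExpand b (ts ++ ys) (a - 1) from by
          simp [pvExpand, ht],
        show pvExpand b (t :: ts) a
            = (t ++ caRep (b + if a > 0 then 1 else 0)) :: pvExpand b ts (a - 1) from by
          simp [pvExpand, ht],
        ih]
      have harg : a - 1 - (ts.count [' '] : Int) = a - (((t :: ts).count [' '] : Nat) : Int) := by
        rw [show (t :: ts).count [' '] = ts.count [' '] + 1 from by simp [ht]]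
        push_cast; ring
      rw [harg, List.cons_append]
    · rw [List.cons_append,
        show pvExpand b (t :: (ts ++ ys)) a = t :: pvExpand b (ts ++ ys) a from by
          simp [pvExpand, ht],
        show pvExpand b (t :: ts) a = t :: pvExpand b ts a from by
          simp [pvExpand, ht],
        ih]
      have harg : a - (ts.count [' '] : Int) = a - (((t :: ts).count [' '] : Nat) : Int) := by
        rw [show (t :: ts).count [' '] = ts.count [' '] from by simp [ht]]
      rw [harg, List.cons_append]

lemma pvAlign_fold (differ spaces : Int) (rest : List (List Char)) :
    ∀ (done : List (List Char)) (a : Int),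
    ((PySem.List.pyRange (done.length : Int) ((done.length : Int) + (rest.length : Int))).foldl
        (caAlignStep differ spaces) (done ++ rest, a)).1
      = done ++ pvExpand (PySem.Int.floordiv differ spaces) rest a := by
  induction rest with
  | nil =>
    intro done a
    simp [PySem.List.pyRange, pvExpand]
  | cons t ts ih =>
    intro done a
    have hlt : (done.length : Int) < (done.length : Int) + ((t :: ts).length : Int) := by
      rw [show ((t :: ts).length : Int) = (ts.length : Int) + 1 from by
        rw [List.length_cons]; push_cast; ring]
      omega
    rw [PySem.List.pyRange_one_cons hlt, List.foldl_cons]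
    have hget : PySem.List.pyGetD (done ++ t :: ts) (done.length : Int) [] = t := by
      simp
    by_cases ht : t = [' ']
    · have hstep' : caAlignStep differ spaces (done ++ t :: ts, a) (done.length : Int)
          = (done ++ (t ++ caRep (PySem.Int.floordiv differ spaces + (if a > 0 then 1 else 0))) :: ts, a - 1) := by
        simp [caAlignStep, ht]
      rw [hstep']
      set nt := t ++ caRep (PySem.Int.floordiv differ spaces + (if a > 0 then 1 else 0)) with hnt
      have hre : done ++ nt :: ts = (done ++ [nt]) ++ ts := by simp
      have hb1 : (done.length : Int) + 1 = ((done ++ [nt]).length : Int) := by simp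
      have hb2 : (done.length : Int) + ((t :: ts).length : Int)
          = ((done ++ [nt]).length : Int) + (ts.length : Int) := by
        simp; ring
      rw [hre, hb1, hb2, ih (done ++ [nt]) (a - 1)]
      simp [pvExpand, ht, hnt]
    · have hstep' : caAlignStep differ spaces (done ++ t :: ts, a) (done.length : Int)
          = (done ++ t :: ts, a) := by
        simp [caAlignStep, hget, ht]
      rw [hstep']
      have hre : done ++ t :: ts = (done ++ [t]) ++ ts := by simp
      have hb1 : (done.length : Int) + 1 = ((done ++ [t]).length : Int) := by simp
      have hb2 : (done.length : Int) + ((t :: ts).length : Int)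
          = ((done ++ [t]).length : Int) + (ts.length : Int) := by
        simp; ring
      rw [hre, hb1, hb2, ih (done ++ [t]) a]
      simp [pvExpand, ht]

lemma pvRep (m : Int) :
    List.replicate (1 + max 0 m).toNat ' ' = ' ' :: caRep m := by
  have h : (1 + max 0 m).toNat = m.toNat + 1 := by omega
  rw [h, List.replicate_succ]
  rfl

lemma pvFlat (b e : Int) (cs : List Char) : ∀ (k : Int),
    (pvExpand b (pvTokL cs) (e - k)).flatten = (pvPieces b e cs k).flatten := by

  induction cs with
  | nil =>
    intro k
    simp [pvTokL, pvTok, pvExpand, pvPieces]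
  | cons c cs ih =>
    intro k
    have h1 : ¬ (([] : List Char) = [' ']) := by decide
    by_cases hc : c = ' '
    · have htr : pvTokL (c :: cs) = [] :: [' '] :: pvTokL cs := by
        simp [pvTokL, pvTok, hc]
      have e1 : pvExpand b ([] :: [' '] :: pvTokL cs) (e - k)
          = [] :: ([' '] ++ caRep (b + if e - k > 0 then 1 else 0))
              :: pvExpand b (pvTokL cs) (e - k - 1) := by
        simp [pvExpand, h1]
      have e2 : pvPieces b e (c :: cs) k
          = List.replicate (1 + max 0 (b + if k < e then 1 else 0)).toNat ' '
              :: pvPieces b e cs (k + 1) := by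
        simp [pvPieces, hc]
      rw [htr, e1, e2, List.flatten_cons, List.flatten_cons, List.flatten_cons,
        show e - k - 1 = e - (k + 1) from by ring, ih (k + 1), pvRep]
      have hbit : (if e - k > 0 then (1 : Int) else 0) = (if k < e then 1 else 0) := by
        by_cases hk : k < e
        · rw [if_pos hk, if_pos (by omega)]
        · rw [if_neg hk, if_neg (by omega)]
      rw [hbit]
      simp
    · have hne : (c :: (pvTok cs).1) ≠ [' '] := by simp [hc]
      have hne' : (pvTok cs).1 ≠ [' '] := pvTok_fst_ne cs
      have htr : pvTokL (c :: cs) = (c :: (pvTok cs).1) :: (pvTok cs).2 := by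
        simp [pvTokL, pvTok, hc]
      have e1 : pvExpand b ((c :: (pvTok cs).1) :: (pvTok cs).2) (e - k)
          = (c :: (pvTok cs).1) :: pvExpand b (pvTok cs).2 (e - k) := by
        simp [pvExpand, hne]
      have e2 : pvExpand b (pvTokL cs) (e - k)
          = (pvTok cs).1 :: pvExpand b (pvTok cs).2 (e - k) := by
        simp [pvTokL, pvExpand, hne']
      have e3 : pvPieces b e (c :: cs) k = [c] :: pvPieces b e cs k := by
        simp [pvPieces, hc]
      have ihk := ih k
      rw [e2, List.flatten_cons] at ihk
      rw [htr, e1, e3, List.flatten_cons, List.flatten_cons, List.cons_append, ← ihk]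
      simp

lemma pvB_fold (b e : Int) (cs : List Char) : ∀ (acc : List (List Char)) (k : Int),
    (cs.foldl (cbStep b e) (acc, k)).1 = acc ++ pvPieces b e cs k := by

  induction cs with
  | nil => intro acc k; simp [pvPieces]
  | cons c cs ih =>
    intro acc k
    by_cases hc : c = ' ' <;> simp [cbStep, hc, pvPieces, ih]

lemma pvLine (scrWidth : Int) (cs : List Char) :
    caAlign scrWidth (caSplit cs) = cbLine scrWidth cs := by
  have hsplit := pvSplit_eq cs
  set toksR := caSplit cs with htR
  obtain ⟨hcnt, hsum, hflat, hexp⟩ :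
      toksR.count [' '] = cs.count ' ' ∧
      ((toksR.map PySem.List.len).sum = (cs.length : Int)) ∧
      toksR.flatten = cs ∧
      (∀ b a, (pvExpand b toksR a).flatten = (pvExpand b (pvTokL cs) a).flatten) := by
    by_cases hmem : ([] : List Char) ∈ pvTokL cs
    · rw [if_pos hmem] at hsplit
      obtain ⟨l₁, l₂, -, hdec, herase⟩ := List.exists_erase_eq hmem
      rw [herase] at hsplit
      refine ⟨?_, ?_, ?_, ?_⟩
      · rw [hsplit, ← pvTok_count cs, hdec]
        simp [List.count_append]
      · rw [hsplit, ← pvTok_sumlen cs, hdec]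
        simp [PySem.List.len]
      · rw [hsplit, ← pvTok_flatten cs, hdec]
        simp
      · intro b a
        rw [hsplit, hdec, pvExpand_append, pvExpand_append]
        have h1 : ¬ (([] : List Char) = [' ']) := by decide
        simp [pvExpand, h1]
    · rw [if_neg hmem] at hsplit
      rw [hsplit]
      exact ⟨pvTok_count cs, pvTok_sumlen cs, pvTok_flatten cs, fun b a => rfl⟩
  unfold caAlign cbLine
  rw [PySem.List.count_eq, hcnt]
  by_cases hz : cs.count ' ' = 0
  · simp [hz, pvJoin_nil_flatten, hflat]
  · have hz' : ((cs.count ' ' : Nat) : Int) ≠ 0 := by exact_mod_cast hz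
    simp only [ne_eq, hz', not_false_eq_true, if_true]
    have hlen : ((PySem.List.pyRange 0 (PySem.List.len toksR)).foldl
        (fun acc j => acc + PySem.List.len (PySem.List.pyGetD toksR j [])) 0)
        = (cs.length : Int) := by
      rw [PySem.List.foldl_pyRange_pyGetD toksR [] (fun acc t => acc + PySem.List.len t) 0 (le_refl 0)]
      simp only [Int.toNat_zero, List.drop_zero]
      rw [PySem.List.foldl_add]
      simpa using hsum
    rw [hlen]
    have halign := pvAlign_fold (scrWidth - (cs.length : Int)) ((cs.count ' ' : Nat) : Int)
        toksR [] (PySem.Int.mod (scrWidth - (cs.length : Int)) ((cs.count ' ' : Nat) : Int))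
    simp only [List.length_nil, Nat.cast_zero, List.nil_append, zero_add] at halign
    have hrange : PySem.List.pyRange 0 (PySem.List.len toksR)
        = PySem.List.pyRange 0 ((toksR.length : Nat) : Int) := by
      simp [PySem.List.len_eq]
    rw [hrange, pvJoin_nil_flatten, halign, hexp]
    have hflat2 := pvFlat (PySem.Int.floordiv (scrWidth - (cs.length : Int)) ((cs.count ' ' : Nat) : Int))
        (PySem.Int.mod (scrWidth - (cs.length : Int)) ((cs.count ' ' : Nat) : Int)) cs 0
    rw [sub_zero] at hflat2
    rw [hflat2, pvB_fold]
    simp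

-- ===== VERDICT (by name: the statement is the Claim_ definition above) =====
theorem centerAlign_spec : Claim_equal_centerAlign := by
  intro listed scrWidth _
  unfold Spec_centerAlign centerAlign centerAlign_alt
  simp only [List.map_map]
  exact List.map_congr_left (fun line _ => by simp [Function.comp, pvLine])
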